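-- pv_equiv track=rewrite | github.com/Ngocmai242/Fitting-AI- | backend/normalize_categories.py | detect_style_tag
-- ===== SOURCE A (Python) =====
-- import unicodedata
--
-- def norm(s: str) -> str:
--     s = (s or "").strip().lower()
--     s = " ".join(s.split())
--     # remove accents for more robust keyword matching
--     s = unicodedata.normalize("NFD", s)
--     s = "".join(ch for ch in s if unicodedata.category(ch) != "Mn")
--     return s
--
-- def detect_style_tag(existing: str) -> str:
--     ex = norm(existing)
--     if ex in ("streetwear", "korean", "minimalist", "classic", "y2k", "boho", "any"):
--         return ex
--     if "streetwear" in ex: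
--         return "streetwear"
--     if any(k in ex for k in ["korean", "kpop"]):
--         return "korean"
--     if "minimal" in ex or "minimalist" in ex:
--         return "minimalist"
--     if any(k in ex for k in ["classic", "basic"]):
--         return "classic"
--     if "y2k" in ex:
--         return "y2k"
--     if "boho" in ex:
--         return "boho"
--     return "any"
-- ===== SOURCE B (Python) =====
-- import unicodedata
--
-- def norm(s: str) -> str:
--     s = (s or "").strip().lower()
--     s = " ".join(s.split())
--     s = unicodedata.normalize("NFD", s)
--     s = "".join(ch for ch in s if unicodedata.category(ch) != "Mn")
--     return s
--
-- # keyword -> priority of the tag it selects; priority index -> tag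
-- _KEYWORDS = [("streetwear", 0), ("korean", 1), ("kpop", 1), ("minimal", 2),
--              ("classic", 3), ("basic", 3), ("y2k", 4), ("boho", 5)]
-- _TAGS = ["streetwear", "korean", "minimalist", "classic", "y2k", "boho"]
--
-- def detect_style_tag(existing: str) -> str:
--     ex = norm(existing)
--     best = 6
--     for i in range(len(ex)):
--         for kw, p in _KEYWORDS:
--             if p < best and ex.startswith(kw, i):
--                 best = p
--     return _TAGS[best] if best < 6 else "any"
-- ===== Notes on version B (the rewrite author's own statement) =====
-- stated objective: alternative
-- what changed: Instead of testing hard-coded keyword substrings one after another with early returns, B makes a single left-to-right scan over the normalized string, recording at each position the lowest priority of any keyword starting there (a data-driven keyword->priority table), and maps the best priority found to its tag; the redundant exact-match tuple disappears since every tag string contains its own keyword.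
import Mathlib
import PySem

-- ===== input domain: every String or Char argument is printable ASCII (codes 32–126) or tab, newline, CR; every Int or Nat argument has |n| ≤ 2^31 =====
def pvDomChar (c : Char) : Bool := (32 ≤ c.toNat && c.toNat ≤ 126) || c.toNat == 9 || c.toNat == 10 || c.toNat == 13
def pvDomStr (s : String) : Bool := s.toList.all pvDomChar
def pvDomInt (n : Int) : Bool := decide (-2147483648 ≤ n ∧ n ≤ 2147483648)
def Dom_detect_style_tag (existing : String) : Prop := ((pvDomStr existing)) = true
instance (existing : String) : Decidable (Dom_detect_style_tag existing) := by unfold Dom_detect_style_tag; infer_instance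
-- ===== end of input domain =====

-- B replaces A's early-return chain of per-keyword substring tests by a single left-to-right
-- scan over the normalized string that, at each position, records the best (lowest) priority
-- of any keyword starting there (alternative decomposition; same cost). Return value only.

-- ===== PORT A =====
-- norm: strip, lower, whitespace-collapse; the NFD + Mn-removal lines are the identity on
-- printable-ASCII input (Dom), so they are ported as the identity (exact on the stated domain).
def pyNorm (s : String) : String :=
  PySem.Str.join " " (PySem.Str.split₀ (PySem.Str.lower (PySem.Str.strip s)))

def detect_style_tag (existing : String) : String :=
  let ex := pyNorm existing
  if ex ∈ ["streetwear", "korean", "minimalist", "classic", "y2k", "boho", "any"] then ex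
  else if PySem.Str.isIn "streetwear" ex then "streetwear"
  else if ["korean", "kpop"].any (fun k => PySem.Str.isIn k ex) then "korean"
  else if PySem.Str.isIn "minimal" ex || PySem.Str.isIn "minimalist" ex then "minimalist"
  else if ["classic", "basic"].any (fun k => PySem.Str.isIn k ex) then "classic"
  else if PySem.Str.isIn "y2k" ex then "y2k"
  else if PySem.Str.isIn "boho" ex then "boho"
  else "any"

-- ===== PORT B =====
def pvKW : List (String × Nat) :=
  [("streetwear", 0), ("korean", 1), ("kpop", 1), ("minimal", 2),
   ("classic", 3), ("basic", 3), ("y2k", 4), ("boho", 5)]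

def pvTags : List String := ["streetwear", "korean", "minimalist", "classic", "y2k", "boho"]

-- the inner 'for kw, p in _KEYWORDS' loop at position i (ex.startswith(kw, i) = prefix of drop i)
def pvStep (l : List Char) (b : Nat) (i : Nat) : Nat :=
  pvKW.foldl (fun b kp => if kp.2 < b ∧ kp.1.toList.isPrefixOf (l.drop i) then kp.2 else b) b

def detect_style_tag_alt (existing : String) : String :=
  let l := (pyNorm existing).toList
  let best := (List.range l.length).foldl (pvStep l) 6
  if best < 6 then pvTags.getD best "any" else "any"   -- best < 6 guarantees the index is in range

-- ===== PRECONDITION & SPEC =====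
def Spec_detect_style_tag (existing : String) (out : String) : Prop := out = detect_style_tag_alt existing
instance (existing : String) (out : String) : Decidable (Spec_detect_style_tag existing out) := by unfold Spec_detect_style_tag; infer_instance

-- ===== CLAIM (what is proved, stated in full; the proofs are below) =====
def Claim_equal_detect_style_tag : Prop := ∀ (existing : String), Dom_detect_style_tag existing → Spec_detect_style_tag existing (detect_style_tag existing)

-- ===== LEMMAS AND PROOFS =====

-- inner fold: never increases the accumulator
theorem pv_inner_le (t : List Char) : ∀ (L : List (String × Nat)) (b : Nat),
    L.foldl (fun b kp => if kp.2 < b ∧ kp.1.toList.isPrefixOf t then kp.2 else b) b ≤ b := by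
  intro L
  induction L with
  | nil => intro b; simp
  | cons kp L ih =>
      intro b
      refine le_trans (ih _) ?_
      dsimp only
      split_ifs with h
      · omega
      · exact le_refl b

-- inner fold: a matching entry bounds the result by its priority
theorem pv_inner_complete (t : List Char) : ∀ (L : List (String × Nat)) (b : Nat)
    (kp : String × Nat), kp ∈ L → kp.1.toList.isPrefixOf t →
    L.foldl (fun b kp => if kp.2 < b ∧ kp.1.toList.isPrefixOf t then kp.2 else b) b ≤ kp.2 := by
  intro L
  induction L with
  | nil => intro b kp h; simp at h
  | cons kq L ih =>
      intro b kp hmem hpre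
      rcases List.mem_cons.mp hmem with h | h
      · subst h
        simp only [List.foldl_cons]
        refine le_trans (pv_inner_le t L _) ?_
        dsimp only
        split_ifs with h
        · omega
        · simp only [hpre, and_true] at h; omega
      · exact ih _ kp h hpre

-- inner fold: the result is the start value or the priority of a matching entry
theorem pv_inner_sound (t : List Char) : ∀ (L : List (String × Nat)) (b : Nat),
    L.foldl (fun b kp => if kp.2 < b ∧ kp.1.toList.isPrefixOf t then kp.2 else b) b = b ∨
    ∃ kp ∈ L, kp.1.toList.isPrefixOf t ∧
      L.foldl (fun b kp => if kp.2 < b ∧ kp.1.toList.isPrefixOf t then kp.2 else b) b = kp.2 := by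
  intro L
  induction L with
  | nil => intro b; left; rfl
  | cons kq L ih =>
      intro b
      simp only [List.foldl_cons]
      by_cases h : kq.2 < b ∧ kq.1.toList.isPrefixOf t
      · rw [if_pos h]
        rcases ih kq.2 with h2 | ⟨kp, hm, hp, he⟩
        · exact Or.inr ⟨kq, List.mem_cons_self, h.2, h2⟩
        · exact Or.inr ⟨kp, List.mem_cons_of_mem _ hm, hp, he⟩
      · rw [if_neg h]
        rcases ih b with h2 | ⟨kp, hm, hp, he⟩
        · exact Or.inl h2
        · exact Or.inr ⟨kp, List.mem_cons_of_mem _ hm, hp, he⟩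

-- outer fold versions
theorem pv_outer_le (l : List Char) : ∀ (R : List Nat) (b : Nat),
    R.foldl (pvStep l) b ≤ b := by
  intro R
  induction R with
  | nil => intro b; simp
  | cons i R ih =>
      intro b
      exact le_trans (ih _) (pv_inner_le _ _ _)

theorem pv_outer_complete (l : List Char) : ∀ (R : List Nat) (b : Nat) (i : Nat)
    (kp : String × Nat), i ∈ R → kp ∈ pvKW → kp.1.toList.isPrefixOf (l.drop i) →
    R.foldl (pvStep l) b ≤ kp.2 := by
  intro R
  induction R with
  | nil => intro b i kp h; simp at h
  | cons j R ih =>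
      intro b i kp hmem hkw hpre
      rcases List.mem_cons.mp hmem with h | h
      · subst h
        exact le_trans (pv_outer_le l R _) (pv_inner_complete _ _ _ kp hkw hpre)
      · exact ih _ i kp h hkw hpre

theorem pv_outer_sound (l : List Char) : ∀ (R : List Nat) (b : Nat),
    R.foldl (pvStep l) b = b ∨
    ∃ i ∈ R, ∃ kp ∈ pvKW, kp.1.toList.isPrefixOf (l.drop i) ∧
      R.foldl (pvStep l) b = kp.2 := by
  intro R
  induction R with
  | nil => intro b; left; rfl
  | cons j R ih =>
      intro b
      simp only [List.foldl_cons]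
      rcases ih (pvStep l b j) with h2 | ⟨i, hi, kp, hm, hp, he⟩
      · rcases pv_inner_sound (l.drop j) pvKW b with h3 | ⟨kp, hm, hp, he⟩
        · exact Or.inl (h2.trans h3)
        · exact Or.inr ⟨j, List.mem_cons_self, kp, hm, hp, h2.trans he⟩
      · exact Or.inr ⟨i, List.mem_cons_of_mem _ hi, kp, hm, hp, he⟩

-- bridge: a position-scan match is exactly Python's 'kw in ex', for nonempty kw
theorem pv_scan_iff_isIn (kw : String) (hk : kw.toList ≠ []) (ex : String) :
    (∃ i ∈ List.range ex.toList.length, kw.toList.isPrefixOf (ex.toList.drop i)) ↔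
    PySem.Str.isIn kw ex = true := by
  constructor
  · rintro ⟨i, _, hp⟩
    rw [PySem.Str.isIn_iff_infix]
    exact List.IsInfix.trans (List.IsPrefix.isInfix (List.isPrefixOf_iff_prefix.mp hp))
      (List.IsSuffix.isInfix (List.drop_suffix i _))
  · intro h
    have h2 : PySem.Chars.isIn kw.toList ex.toList = true := by
      rw [PySem.Chars.isIn_iff_infix]; exact (PySem.Str.isIn_iff_infix _ _).mp h
    obtain ⟨j, hj⟩ := (PySem.Chars.exists_prefix_drop_iff_isIn kw.toList ex.toList).mpr h2
    by_cases hlt : j < ex.toList.length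
    · exact ⟨j, List.mem_range.mpr hlt, List.isPrefixOf_iff_prefix.mpr hj⟩
    · exfalso
      rw [List.drop_eq_nil_of_le (le_of_not_gt hlt)] at hj
      exact hk (List.prefix_nil.mp hj)

-- abbreviation for B's accumulator value
theorem pv_best_le (ex : String) (kp : String × Nat) (hkw : kp ∈ pvKW)
    (h : PySem.Str.isIn kp.1 ex = true) (hk : kp.1.toList ≠ []) :
    (List.range ex.toList.length).foldl (pvStep ex.toList) 6 ≤ kp.2 := by
  obtain ⟨i, hi, hp⟩ := (pv_scan_iff_isIn kp.1 hk ex).mpr h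
  exact pv_outer_complete _ _ _ i kp hi hkw hp

-- sound, phrased with isIn
theorem pv_best_sound (ex : String) :
    (List.range ex.toList.length).foldl (pvStep ex.toList) 6 = 6 ∨
    ∃ kp ∈ pvKW, PySem.Str.isIn kp.1 ex = true ∧
      (List.range ex.toList.length).foldl (pvStep ex.toList) 6 = kp.2 := by
  rcases pv_outer_sound ex.toList (List.range ex.toList.length) 6 with h | ⟨i, hi, kp, hm, hp, he⟩
  · exact Or.inl h
  · refine Or.inr ⟨kp, hm, ?_, he⟩
    have hk : kp.1.toList ≠ [] := by fin_cases hm <;> decide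
    exact (pv_scan_iff_isIn kp.1 hk ex).mp ⟨i, hi, hp⟩

-- "minimalist" in ex implies "minimal" in ex
theorem pv_minimalist_imp (ex : String) (h : PySem.Str.isIn "minimalist" ex = true) :
    PySem.Str.isIn "minimal" ex = true := by
  rw [PySem.Str.isIn_iff_infix] at h ⊢
  exact List.IsInfix.trans (by decide : ("minimal" : String).toList <:+: ("minimalist" : String).toList) h

-- the core fact, for an arbitrary normalized string ex
set_option maxRecDepth 40000 in
theorem pv_key (ex : String) :
    (if ex ∈ ["streetwear", "korean", "minimalist", "classic", "y2k", "boho", "any"] then ex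
     else if PySem.Str.isIn "streetwear" ex then "streetwear"
     else if ["korean", "kpop"].any (fun k => PySem.Str.isIn k ex) then "korean"
     else if PySem.Str.isIn "minimal" ex || PySem.Str.isIn "minimalist" ex then "minimalist"
     else if ["classic", "basic"].any (fun k => PySem.Str.isIn k ex) then "classic"
     else if PySem.Str.isIn "y2k" ex then "y2k"
     else if PySem.Str.isIn "boho" ex then "boho"
     else "any") =
    (if (List.range ex.toList.length).foldl (pvStep ex.toList) 6 < 6 then
       pvTags.getD ((List.range ex.toList.length).foldl (pvStep ex.toList) 6) "any"
     else "any") := by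
  by_cases hmem : ex ∈ ["streetwear", "korean", "minimalist", "classic", "y2k", "boho", "any"]
  · fin_cases hmem <;> decide
  · rw [if_neg hmem]
    simp only [List.any_cons, List.any_nil, Bool.or_false, Bool.or_eq_true]
    set best := (List.range ex.toList.length).foldl (pvStep ex.toList) 6 with hbest
    have sound := pv_best_sound ex
    rw [← hbest] at sound
    by_cases h0 : PySem.Str.isIn "streetwear" ex = true
    · have hle := pv_best_le ex ("streetwear", 0) (by decide) h0 (by decide)
      rw [← hbest] at hle
      have hv : best = 0 := by omega
      rw [if_pos h0, hv]; decide
    · rw [if_neg h0]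
      have n0 : best ≠ 0 := by
        intro hb
        rcases sound with h | ⟨kp, hm, hin, he⟩
        · omega
        · rw [hb] at he
          fin_cases hm <;> first | exact absurd he (by decide) | exact h0 hin
      by_cases h1 : PySem.Str.isIn "korean" ex = true ∨ PySem.Str.isIn "kpop" ex = true
      · have hle : best ≤ 1 := by
          rcases h1 with h | h
          · have := pv_best_le ex ("korean", 1) (by decide) h (by decide); rw [← hbest] at this; exact this
          · have := pv_best_le ex ("kpop", 1) (by decide) h (by decide); rw [← hbest] at this; exact this
        have hv : best = 1 := by omega
        rw [if_pos h1, hv]; decide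
      · rw [if_neg h1]
        have n1 : best ≠ 1 := by
          intro hb
          rcases sound with h | ⟨kp, hm, hin, he⟩
          · omega
          · rw [hb] at he
            fin_cases hm <;>
              first | exact absurd he (by decide) | exact h1 (Or.inl hin) | exact h1 (Or.inr hin)
        by_cases h2 : PySem.Str.isIn "minimal" ex = true ∨ PySem.Str.isIn "minimalist" ex = true
        · have h2' : PySem.Str.isIn "minimal" ex = true := by
            rcases h2 with h | h
            · exact h
            · exact pv_minimalist_imp ex h
          have hle := pv_best_le ex ("minimal", 2) (by decide) h2' (by decide)
          rw [← hbest] at hle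
          have hv : best = 2 := by omega
          rw [if_pos h2, hv]; decide
        · rw [if_neg h2]
          have h2' : ¬ PySem.Str.isIn "minimal" ex = true := fun h => h2 (Or.inl h)
          have n2 : best ≠ 2 := by
            intro hb
            rcases sound with h | ⟨kp, hm, hin, he⟩
            · omega
            · rw [hb] at he
              fin_cases hm <;> first | exact absurd he (by decide) | exact h2' hin
          by_cases h3 : PySem.Str.isIn "classic" ex = true ∨ PySem.Str.isIn "basic" ex = true
          · have hle : best ≤ 3 := by
              rcases h3 with h | h
              · have := pv_best_le ex ("classic", 3) (by decide) h (by decide); rw [← hbest] at this; exact this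
              · have := pv_best_le ex ("basic", 3) (by decide) h (by decide); rw [← hbest] at this; exact this
            have hv : best = 3 := by omega
            rw [if_pos h3, hv]; decide
          · rw [if_neg h3]
            have n3 : best ≠ 3 := by
              intro hb
              rcases sound with h | ⟨kp, hm, hin, he⟩
              · omega
              · rw [hb] at he
                fin_cases hm <;>
                  first | exact absurd he (by decide) | exact h3 (Or.inl hin) | exact h3 (Or.inr hin)
            by_cases h4 : PySem.Str.isIn "y2k" ex = true
            · have hle := pv_best_le ex ("y2k", 4) (by decide) h4 (by decide)
              rw [← hbest] at hle
              have hv : best = 4 := by omega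
              rw [if_pos h4, hv]; decide
            · rw [if_neg h4]
              have n4 : best ≠ 4 := by
                intro hb
                rcases sound with h | ⟨kp, hm, hin, he⟩
                · omega
                · rw [hb] at he
                  fin_cases hm <;> first | exact absurd he (by decide) | exact h4 hin
              by_cases h5 : PySem.Str.isIn "boho" ex = true
              · have hle := pv_best_le ex ("boho", 5) (by decide) h5 (by decide)
                rw [← hbest] at hle
                have hv : best = 5 := by omega
                rw [if_pos h5, hv]; decide
              · rw [if_neg h5]
                have n5 : best ≠ 5 := by
                  intro hb
                  rcases sound with h | ⟨kp, hm, hin, he⟩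
                  · omega
                  · rw [hb] at he
                    fin_cases hm <;> first | exact absurd he (by decide) | exact h5 hin
                have hv : ¬ best < 6 := by omega
                rw [if_neg hv]

-- ===== VERDICT (by name: the statement is the Claim_ definition above) =====
theorem detect_style_tag_spec : Claim_equal_detect_style_tag := by
  intro existing _
  unfold Spec_detect_style_tag detect_style_tag detect_style_tag_alt
  exact pv_key (pyNorm existing)
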